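-- pv_equiv track=rewrite | github.com/pranavanil47/Csc-110-project | gradescopeprojects/infograph.py | most_occurunce
-- ===== SOURCE A (Python) =====
-- def most_occurunce(word_count):
--     '''
--     This function reads the dictionary and then returns which small word occurs
--     the most and the number of times it occurs, same for medium and , large word.
--     Parameters;
--     word_count: This can be any dictionary with the format {string:integer}
--     '''
--     large_count = 0
--     med_count = 0
--     small_count = 0
--     for key,value in word_count.items():             # this loop is to find the most small word,
--         length = len(key)                            # medium word and large word occured.
--         if length <= 4:
--             if value > small_count:
--                 small_count = value
--         elif 5 <= length <=7:
--             if value > med_count: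
--                 med_count = value
--         elif length >= 8:
--             if value > large_count:
--                 large_count = value
--     small_word = value_to_key(small_count,word_count)
--     med_word = value_to_key(med_count,word_count)    ## Finding which word is associated to the
--     large_word = value_to_key(large_count,word_count)## the specific occurance.
--     return small_word, small_count ,med_word, med_count,large_word, large_count
--
-- def value_to_key(number,word_count):
--     '''
--     This function returns the string with the help of number of occurances.
--     Parameters;
--     number: This can be any integer of occurances or the value in the dictionary.
--     word_count: This can be any dictionary with the format {string:integer}.
--     '''
--     for key,value in word_count.items():                       # looping to find the key to specific
--         if value == number:                                    # nuumber of occurances.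
--             return key
-- ===== SOURCE B (Python) =====
-- def most_occurunce(word_count):
--     items = list(word_count.items())
--
--     def peak(pred):
--         # largest count in the category, floored at 0 (A starts its maxima at 0)
--         return max([v for k, v in items if pred(len(k))] + [0])
--
--     small_count = peak(lambda n: n <= 4)
--     med_count = peak(lambda n: 5 <= n <= 7)
--     large_count = peak(lambda n: n >= 8)
--
--     def word_for(count):
--         # first key in the WHOLE dict carrying this count, None if absent
--         return next((k for k, v in items if v == count), None)
--
--     return (word_for(small_count), small_count,
--             word_for(med_count), med_count,
--             word_for(large_count), large_count)
-- ===== Notes on version B (the rewrite author's own statement) =====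
-- stated objective: idiomatic
-- what changed: B replaces A's single branching accumulator loop by three independent declarative passes (max over a filtered comprehension per length category, floored at 0) and resolves each word with next() over a generator instead of the value_to_key helper loop.
import Mathlib
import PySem

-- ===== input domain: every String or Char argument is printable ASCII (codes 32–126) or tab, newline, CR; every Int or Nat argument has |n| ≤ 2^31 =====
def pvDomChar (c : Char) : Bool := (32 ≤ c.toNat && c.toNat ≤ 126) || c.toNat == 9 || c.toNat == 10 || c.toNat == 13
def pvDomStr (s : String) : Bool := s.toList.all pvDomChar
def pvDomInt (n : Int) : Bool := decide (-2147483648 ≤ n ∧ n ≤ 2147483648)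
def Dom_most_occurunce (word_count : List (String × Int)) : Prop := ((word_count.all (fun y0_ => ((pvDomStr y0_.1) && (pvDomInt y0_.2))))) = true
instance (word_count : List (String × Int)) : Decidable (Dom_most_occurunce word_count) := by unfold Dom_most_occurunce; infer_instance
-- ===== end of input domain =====

-- B replaces A's single branching accumulator loop by three independent filtered max() passes
-- (floored at 0) and next()-based lookups; return value only, neither program mutates its input.

-- ===== PORT A =====
def value_to_key (number : Int) (word_count : List (String × Int)) : Option String :=
  match word_count with
  | [] => none
  | (key, value) :: rest => if value == number then some key else value_to_key number rest

-- loop body of A; state is (large_count, med_count, small_count)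
def pvStepA (s : Int × Int × Int) (kv : String × Int) : Int × Int × Int :=
  let length := PySem.Str.len kv.1
  if length ≤ 4 then
    (s.1, s.2.1, if kv.2 > s.2.2 then kv.2 else s.2.2)
  else if 5 ≤ length ∧ length ≤ 7 then
    (s.1, if kv.2 > s.2.1 then kv.2 else s.2.1, s.2.2)
  else if 8 ≤ length then
    (if kv.2 > s.1 then kv.2 else s.1, s.2.1, s.2.2)
  else s

def most_occurunce (word_count : List (String × Int)) : Option String × Int × Option String × Int × Option String × Int :=
  let st := word_count.foldl pvStepA (0, 0, 0)
  (value_to_key st.2.2 word_count, st.2.2,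
   value_to_key st.2.1 word_count, st.2.1,
   value_to_key st.1 word_count, st.1)

-- ===== PORT B =====
-- Python max of a nonempty list (left-to-right fold from the head)
def pvPyMax : List Int → Int
  | [] => 0   -- unreachable: B always appends [0]
  | x :: xs => xs.foldl max x

-- next((k for k, v in items if v == count), None)
def pvWordFor (items : List (String × Int)) (count : Int) : Option String :=
  (items.find? (fun kv => kv.2 == count)).map Prod.fst

def most_occurunce_alt (word_count : List (String × Int)) : Option String × Int × Option String × Int × Option String × Int :=
  let small := pvPyMax (((word_count.filter fun kv => PySem.Str.len kv.1 ≤ 4).map Prod.snd) ++ [0])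
  let med := pvPyMax (((word_count.filter fun kv => 5 ≤ PySem.Str.len kv.1 ∧ PySem.Str.len kv.1 ≤ 7).map Prod.snd) ++ [0])
  let large := pvPyMax (((word_count.filter fun kv => 8 ≤ PySem.Str.len kv.1).map Prod.snd) ++ [0])
  (pvWordFor word_count small, small,
   pvWordFor word_count med, med,
   pvWordFor word_count large, large)

-- ===== PRECONDITION & SPEC =====
def Spec_most_occurunce (word_count : List (String × Int)) (out : Option String × Int × Option String × Int × Option String × Int) : Prop := out = most_occurunce_alt word_count
instance (word_count : List (String × Int)) (out : Option String × Int × Option String × Int × Option String × Int) : Decidable (Spec_most_occurunce word_count out) := by unfold Spec_most_occurunce; infer_instance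

-- ===== CLAIM (what is proved, stated in full; the proofs are below) =====
def Claim_equal_most_occurunce : Prop := ∀ (word_count : List (String × Int)), Dom_most_occurunce word_count → Spec_most_occurunce word_count (most_occurunce word_count)

-- ===== LEMMAS AND PROOFS =====

lemma max_if (s v : Int) : (if v > s then v else s) = max s v := by
  rw [max_def]; split_ifs <;> omega

lemma foldl_max_shift : ∀ (l : List Int) (a b : Int),
    l.foldl max (max a b) = max a (l.foldl max b) := by
  intro l
  induction l with
  | nil => intro a b; rfl
  | cons c t ih => intro a b; rw [List.foldl_cons, List.foldl_cons, max_assoc, ih]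

lemma pyMax_append_zero (l : List Int) : pvPyMax (l ++ [0]) = l.foldl max 0 := by
  cases l with
  | nil => rfl
  | cons x xs =>
    show (xs ++ [0]).foldl max x = xs.foldl max (max 0 x)
    rw [List.foldl_append, foldl_max_shift]
    show max (xs.foldl max x) 0 = max 0 (xs.foldl max x)
    exact max_comm _ _

lemma vtk_find (n : Int) : ∀ (wc : List (String × Int)),
    value_to_key n wc = (wc.find? fun kv => kv.2 == n).map Prod.fst := by
  intro wc
  induction wc with
  | nil => rfl
  | cons kv rest ih =>
    obtain ⟨k, v⟩ := kv
    by_cases h : v = n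
    · simp [value_to_key, h]
    · have hb : (v == n) = false := by simpa using h
      simp [value_to_key, hb, ih]

-- A's small accumulator = fold of max over the small-category values
lemma foldA_small : ∀ (wc : List (String × Int)) (s : Int × Int × Int),
    (wc.foldl pvStepA s).2.2 =
      ((wc.filter fun kv => PySem.Str.len kv.1 ≤ 4).map Prod.snd).foldl max s.2.2 := by
  intro wc
  induction wc with
  | nil => intro s; rfl
  | cons kv rest ih =>
    intro s
    rw [List.foldl_cons]
    by_cases h1 : PySem.Str.len kv.1 ≤ 4
    · have hs : pvStepA s kv = (s.1, s.2.1, max s.2.2 kv.2) := by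
        simp only [pvStepA]; rw [if_pos h1, max_if]
      rw [hs, ih, List.filter_cons, if_pos (by simpa using h1), List.map_cons, List.foldl_cons]
    · have hA : (pvStepA s kv).2.2 = s.2.2 := by
        simp only [pvStepA]
        split_ifs <;> simp_all
      rw [ih, hA, List.filter_cons, if_neg (by simpa using h1)]

-- A's medium accumulator
lemma foldA_med : ∀ (wc : List (String × Int)) (s : Int × Int × Int),
    (wc.foldl pvStepA s).2.1 =
      ((wc.filter fun kv => 5 ≤ PySem.Str.len kv.1 ∧ PySem.Str.len kv.1 ≤ 7).map Prod.snd).foldl max s.2.1 := by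
  intro wc
  induction wc with
  | nil => intro s; rfl
  | cons kv rest ih =>
    intro s
    rw [List.foldl_cons]
    by_cases h2 : 5 ≤ PySem.Str.len kv.1 ∧ PySem.Str.len kv.1 ≤ 7
    · have h1 : ¬ PySem.Str.len kv.1 ≤ 4 := by omega
      have hs : pvStepA s kv = (s.1, max s.2.1 kv.2, s.2.2) := by
        simp only [pvStepA]; rw [if_neg h1, if_pos h2, max_if]
      rw [hs, ih, List.filter_cons, if_pos (by simpa using h2), List.map_cons, List.foldl_cons]
    · have hA : (pvStepA s kv).2.1 = s.2.1 := by
        simp only [pvStepA]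
        split_ifs <;> simp_all
      rw [ih, hA, List.filter_cons, if_neg (by simpa using h2)]

-- A's large accumulator
lemma foldA_large : ∀ (wc : List (String × Int)) (s : Int × Int × Int),
    (wc.foldl pvStepA s).1 =
      ((wc.filter fun kv => 8 ≤ PySem.Str.len kv.1).map Prod.snd).foldl max s.1 := by
  intro wc
  induction wc with
  | nil => intro s; rfl
  | cons kv rest ih =>
    intro s
    rw [List.foldl_cons]
    by_cases h3 : 8 ≤ PySem.Str.len kv.1
    · have h1 : ¬ PySem.Str.len kv.1 ≤ 4 := by omega
      have h2 : ¬ (5 ≤ PySem.Str.len kv.1 ∧ PySem.Str.len kv.1 ≤ 7) := by omega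
      have hs : pvStepA s kv = (max s.1 kv.2, s.2.1, s.2.2) := by
        simp only [pvStepA]; rw [if_neg h1, if_neg h2, if_pos h3, max_if]
      rw [hs, ih, List.filter_cons, if_pos (by simpa using h3), List.map_cons, List.foldl_cons]
    · have hA : (pvStepA s kv).1 = s.1 := by
        simp only [pvStepA]
        split_ifs <;> simp_all
      rw [ih, hA, List.filter_cons, if_neg (by simpa using h3)]

-- ===== VERDICT (by name: the statement is the Claim_ definition above) =====
theorem most_occurunce_spec : Claim_equal_most_occurunce := by
  intro wc _
  unfold Spec_most_occurunce most_occurunce most_occurunce_alt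
  simp only [foldA_small, foldA_med, foldA_large, pyMax_append_zero, vtk_find, pvWordFor]
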